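-- pv_equiv track=rewrite | github.com/vkd225/grokking-coding | sliding_window/smallest-substring-containing-all-chars.py | get_all_substrings
-- ===== SOURCE A (Python) =====
-- def get_all_substrings(str1):
--   result = []
--   final_result = []
--   len_pattern = 3
--
--   for i in range(len(str1)):
--     for j in range(len_pattern + i, len(str1) + 1):
--       result.append(str1[i:j])
--
--   #  create an array of object
--   for sub_string in result:
--     sub_str_freq = {}
--     for c in sub_string:
--       if c not in sub_str_freq:
--         sub_str_freq[c] = 0
--       sub_str_freq[c] += 1
--
--     final_result.append(sub_str_freq)
--
--   return result, final_result
-- ===== SOURCE B (Python) =====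
-- def get_all_substrings(str1):
--   result = []
--   final_result = []
--   for i in range(len(str1)):
--     running = {}
--     window = ""
--     for c in str1[i:]:
--       window += c
--       running[c] = running.get(c, 0) + 1
--       if len(window) >= 3:
--         result.append(window)
--         final_result.append(dict(running))
--   return result, final_result
-- ===== Notes on version B (the rewrite author's own statement) =====
-- stated objective: faster
-- what changed: B fuses A's two separate passes (generate all slices, then re-count each substring's characters from scratch) into one sweep per start index that grows the window and maintains its character-frequency dict incrementally, snapshotting the dict at each emitted substring.
import Mathlib
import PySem

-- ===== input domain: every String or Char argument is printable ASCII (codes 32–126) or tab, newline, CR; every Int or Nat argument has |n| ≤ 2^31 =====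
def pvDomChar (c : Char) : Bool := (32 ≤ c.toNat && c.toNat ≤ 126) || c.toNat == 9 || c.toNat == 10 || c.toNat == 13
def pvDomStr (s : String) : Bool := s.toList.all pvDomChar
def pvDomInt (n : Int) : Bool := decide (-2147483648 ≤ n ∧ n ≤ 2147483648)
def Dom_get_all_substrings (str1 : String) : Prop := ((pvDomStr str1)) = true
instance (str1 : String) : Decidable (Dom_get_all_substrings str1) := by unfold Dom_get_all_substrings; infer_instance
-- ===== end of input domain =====

-- B fuses A's two passes into one sweep per start index, maintaining the window string and its
-- character-frequency dict incrementally instead of re-slicing and re-counting each substring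
-- from scratch (objective: faster, by a constant-factor mechanism measured).

-- ===== PORT A =====
-- freq loop of A: for c in sub_string: if c not in d: d[c] = 0; d[c] += 1
-- (a character c used as a dict key is the 1-character string, hence String.ofList [c])
def pvFreqA (sub : List Char) : PySem.Dict String Int :=
  sub.foldl (fun d c =>
    let d1 := if d.contains (String.ofList [c]) then d else d.insert (String.ofList [c]) 0
    d1.modify (String.ofList [c]) 0 (· + 1)) PySem.Dict.empty

-- range(len(str1)) / range(3 + i, len(str1) + 1) are ranges of nonnegative ints: ported exactly as
-- List.range n / List.range' (3+i) ((n+1)-(3+i)) (Nat subtraction = Python's empty range when 3+i > n+1).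
def get_all_substrings (str1 : String) : List String × (List (List (String × Int))) :=
  let n := str1.toList.length
  let result : List String :=
    (List.range n).foldl (fun acc i =>
      (List.range' (3 + i) ((n + 1) - (3 + i))).foldl (fun acc (j : Nat) =>
        acc ++ [PySem.Str.slice str1 (some (i : Int)) (some (j : Int))]) acc) []
  let final := result.foldl (fun acc sub => acc ++ [(pvFreqA sub.toList).items]) []
  (result, final)

-- ===== PORT B =====
-- one step of B's inner loop: window += c; running[c] = running.get(c, 0) + 1;
-- if len(window) >= 3: result.append(window); final_result.append(dict(running))
def pvStepB (st : List Char × PySem.Dict String Int × List String × List (List (String × Int)))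
    (c : Char) : List Char × PySem.Dict String Int × List String × List (List (String × Int)) :=
  let w := st.1 ++ [c]
  let r := st.2.1.insert (String.ofList [c]) (st.2.1.getD (String.ofList [c]) 0 + 1)
  if 3 ≤ w.length then (w, r, st.2.2.1 ++ [String.ofList w], st.2.2.2 ++ [r.items])
  else (w, r, st.2.2.1, st.2.2.2)

-- outer loop of B: for i in range(len(str1)): fresh window/running, then for c in str1[i:]
-- (str1[i:] with 0 ≤ i ≤ len is exactly cs.drop i, cf. PySem.List.slice_from_natCast)
def get_all_substrings_alt (str1 : String) : List String × (List (List (String × Int))) :=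
  let cs := str1.toList
  (List.range cs.length).foldl (fun (st : List String × List (List (String × Int))) i =>
    let r := (cs.drop i).foldl pvStepB ([], PySem.Dict.empty, st.1, st.2)
    (r.2.2.1, r.2.2.2)) ([], [])

-- ===== PRECONDITION & SPEC =====
def Spec_get_all_substrings (str1 : String) (out : List String × (List (List (String × Int)))) : Prop := out = get_all_substrings_alt str1
instance (str1 : String) (out : List String × (List (List (String × Int)))) : Decidable (Spec_get_all_substrings str1 out) := by unfold Spec_get_all_substrings; infer_instance

-- ===== CLAIM (what is proved, stated in full; the proofs are below) =====
def Claim_equal_get_all_substrings : Prop := ∀ (str1 : String), Dom_get_all_substrings str1 → Spec_get_all_substrings str1 (get_all_substrings str1)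

-- ===== LEMMAS AND PROOFS =====

-- B's dict update as a named function, and the frequency dict of a char list (proof helpers)
def pvFB (d : PySem.Dict String Int) (c : Char) : PySem.Dict String Int :=
  d.insert (String.ofList [c]) (d.getD (String.ofList [c]) 0 + 1)

def pvF (l : List Char) : PySem.Dict String Int := l.foldl pvFB PySem.Dict.empty

-- A's two-step update (setdefault-style) equals B's get-based update, on every dict
lemma pvUpd_eq (d : PySem.Dict String Int) (c : Char) :
    (if d.contains (String.ofList [c]) then d else d.insert (String.ofList [c]) 0).modify
      (String.ofList [c]) 0 (· + 1) = pvFB d c := by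
  by_cases h : d.contains (String.ofList [c])
  · simp only [h, if_true]; rfl
  · simp only [h, Bool.false_eq_true, if_false]
    show (d.insert (String.ofList [c]) 0).insert (String.ofList [c])
        ((d.insert (String.ofList [c]) 0).getD (String.ofList [c]) 0 + 1) = _
    rw [PySem.Dict.getD_insert_self, PySem.Dict.insert_insert_self, pvFB,
        PySem.Dict.getD_of_not_contains d 0 (by simpa using h)]

lemma pvFreqA_eq (l : List Char) : pvFreqA l = pvF l := by
  unfold pvFreqA pvF
  exact PySem.List.foldl_congr_mem _ _ _ _ (fun acc x _ => pvUpd_eq acc x)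

lemma pvF_concat (p : List Char) (c : Char) : pvF (p ++ [c]) = pvFB (pvF p) c := by
  simp [pvF, List.foldl_append]

-- invariant of B's inner loop
lemma pvInner (t : List Char) : ∀ (p : List Char) (res : List String)
    (fin : List (List (String × Int))),
    t.foldl pvStepB (p, pvF p, res, fin) =
    (p ++ t, pvF (p ++ t),
     res ++ ((List.range' (p.length + 1) t.length).filter (fun k => decide (3 ≤ k))).map
       (fun k => String.ofList ((p ++ t).take k)),
     fin ++ ((List.range' (p.length + 1) t.length).filter (fun k => decide (3 ≤ k))).map
       (fun k => (pvF ((p ++ t).take k)).items)) := by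
  induction t with
  | nil => intro p res fin; simp
  | cons c t ih =>
    intro p res fin
    rw [List.foldl_cons]
    have hw : (p ++ [c]).length = p.length + 1 := by simp
    have h5 : p ++ c :: t = (p ++ [c]) ++ t := by simp
    by_cases h3 : 3 ≤ p.length + 1
    · have hstep : pvStepB (p, pvF p, res, fin) c =
          (p ++ [c], pvF (p ++ [c]), res ++ [String.ofList (p ++ [c])],
           fin ++ [(pvF (p ++ [c])).items]) := by
        simp only [pvStepB, hw, h3, if_true, pvF_concat, pvFB]
      rw [hstep, ih]
      rw [List.length_cons, List.range'_succ, List.filter_cons]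
      simp only [h3, decide_true, if_true, List.map_cons, h5, hw]
      have htake : ((p ++ [c]) ++ t).take (p.length + 1) = p ++ [c] := by
        rw [List.take_append_of_le_length (by simp)]
        simp
      rw [htake]
      simp [List.append_assoc]
    · have hstep : pvStepB (p, pvF p, res, fin) c =
          (p ++ [c], pvF (p ++ [c]), res, fin) := by
        simp only [pvStepB, hw, h3, if_false, pvF_concat, pvFB]
      rw [hstep, ih]
      rw [List.length_cons, List.range'_succ, List.filter_cons]
      simp only [h3, h5, hw]
      simp

lemma pvFilterRange (m : Nat) :
    (List.range' 1 m).filter (fun k => decide (3 ≤ k)) = List.range' 3 (m - 2) := by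
  induction m with
  | zero => simp
  | succ m ih =>
    rw [List.range'_concat, List.filter_append, ih]
    by_cases h : 3 ≤ 1 + m
    · have h2 : m + 1 - 2 = (m - 2) + 1 := by omega
      rw [h2, List.range'_concat]
      congr 1
      have h3 : (3:Nat) ≤ 1 + 1 * m := by omega
      simp only [List.filter_cons, List.filter_nil, h3, decide_true]
      have h4 : 1 + 1 * m = 3 + 1 * (m - 2) := by omega
      rw [h4]
      simp
    · have h2 : m + 1 - 2 = m - 2 := by omega
      have h3 : ¬ (3 ≤ 1 + m) := h
      simp [h2, h3]

-- B's outer loop accumulates, per start index i, the canonical per-i lists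
lemma pvAlt_fold (cs : List Char) (l : List Nat) :
    ∀ (a : List String) (b : List (List (String × Int))),
    l.foldl (fun (st : List String × List (List (String × Int))) i =>
      let r := (cs.drop i).foldl pvStepB ([], PySem.Dict.empty, st.1, st.2)
      (r.2.2.1, r.2.2.2)) (a, b)
    = (a ++ l.flatMap (fun i => (List.range' 3 ((cs.drop i).length - 2)).map
          (fun k => String.ofList ((cs.drop i).take k))),
       b ++ l.flatMap (fun i => (List.range' 3 ((cs.drop i).length - 2)).map
          (fun k => (pvF ((cs.drop i).take k)).items))) := by
  induction l with
  | nil => intro a b; simp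
  | cons i l ih =>
    intro a b
    rw [List.foldl_cons]
    have h := pvInner (cs.drop i) [] a b
    simp only [List.nil_append, List.length_nil, Nat.zero_add, pvFilterRange] at h
    show (l.foldl _ (((cs.drop i).foldl pvStepB ([], PySem.Dict.empty, a, b)).2.2.1,
        ((cs.drop i).foldl pvStepB ([], PySem.Dict.empty, a, b)).2.2.2)) = _
    rw [show pvF [] = (PySem.Dict.empty : PySem.Dict String Int) from rfl] at h
    rw [h, ih]
    simp [List.append_assoc]

-- str1[i:i+k] (slice) equals drop/take, as a String
lemma pvSlice_eq (str1 : String) (i k : Nat) :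
    PySem.Str.slice str1 (some (i : Int)) (some ((i + k : Nat) : Int)) =
    String.ofList ((str1.toList.drop i).take k) := by
  rw [← String.ofList_toList (s := PySem.Str.slice str1 (some (i : Int)) (some ((i + k : Nat) : Int)))]
  congr 1
  rw [PySem.Str.toList_slice]
  show PySem.List.slice str1.toList (some (i : Int)) (some ((i + k : Nat) : Int)) = _
  rw [PySem.List.slice_natCast]
  congr 1
  omega

lemma main_eq (str1 : String) : get_all_substrings str1 = get_all_substrings_alt str1 := by
  simp only [get_all_substrings, get_all_substrings_alt,
    PySem.List.foldl_append_eq_flatMap, List.nil_append]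
  rw [pvAlt_fold]
  simp only [List.nil_append]
  have hper : ∀ i, (List.range' (3 + i) ((str1.toList.length + 1) - (3 + i))).flatMap
      (fun (j : Nat) => [PySem.Str.slice str1 (some (i : Int)) (some (j : Int))]) =
      (List.range' 3 ((str1.toList.drop i).length - 2)).map
        (fun k => String.ofList ((str1.toList.drop i).take k)) := by
    intro i
    have hc : (str1.toList.length + 1) - (3 + i) = (str1.toList.drop i).length - 2 := by
      simp [List.length_drop]; omega
    rw [hc, List.range'_eq_map_range, List.range'_eq_map_range,
        List.flatMap_map, List.map_map]
    rw [← List.map_eq_flatMap]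
    apply List.map_congr_left
    intro x hx
    show PySem.Str.slice str1 (some (i : Int)) (some ((3 + i + x : Nat) : Int)) = _
    rw [show (3 + i + x) = i + (3 + x) from by omega, pvSlice_eq]
    rfl
  simp only [hper, ← List.map_eq_flatMap, List.map_flatMap, List.map_map, pvFreqA_eq]
  simp [Function.comp_def]

-- ===== VERDICT (by name: the statement is the Claim_ definition above) =====
theorem get_all_substrings_spec : Claim_equal_get_all_substrings := by
  intro str1 _
  unfold Spec_get_all_substrings
  exact main_eq str1
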